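-- pv_equiv track=rewrite | github.com/Aries5522/daily | 2021届秋招/leetcode/面试真题/美团/美团821-3.py | cur_max
-- ===== SOURCE A (Python) =====
-- def cur_max(nums):
--     res = 0
--     max_ = 0
--     i = 0
--     n = len(nums)
--     while i < n:
--         if nums[i] == 0:
--             max_ = max(max_, res)
--             res = 0
--             i += 1
--         else:
--             res += nums[i]
--             i += 1
--     return max(max_,res)
-- ===== SOURCE B (Python) =====
-- def cur_max(nums):
--     # Partition into maximal nonzero runs, then aggregate: max of 0 and each run's sum.
--     segs = []
--     cur = []
--     for x in nums:
--         if x == 0: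
--             if cur:
--                 segs.append(cur)
--                 cur = []
--         else:
--             cur.append(x)
--     if cur:
--         segs.append(cur)
--     return max([0] + [sum(seg) for seg in segs])
-- ===== Notes on version B (the rewrite author's own statement) =====
-- stated objective: alternative
-- what changed: B first partitions nums into explicit maximal nonzero runs, then in a second aggregation pass takes the max of 0 and each run's sum, instead of A's single running-accumulator while loop with an in-loop max update.
import Mathlib
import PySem

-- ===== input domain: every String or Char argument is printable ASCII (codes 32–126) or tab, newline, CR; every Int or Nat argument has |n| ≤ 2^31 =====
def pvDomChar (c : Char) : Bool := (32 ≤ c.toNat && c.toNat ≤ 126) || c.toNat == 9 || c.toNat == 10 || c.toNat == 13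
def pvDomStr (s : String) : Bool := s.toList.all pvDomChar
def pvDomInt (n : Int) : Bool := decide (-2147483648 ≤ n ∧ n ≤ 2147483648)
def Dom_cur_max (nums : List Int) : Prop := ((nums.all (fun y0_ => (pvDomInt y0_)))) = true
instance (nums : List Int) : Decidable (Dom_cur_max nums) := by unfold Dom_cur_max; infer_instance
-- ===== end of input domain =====

-- B partitions nums into explicit maximal nonzero runs and then takes the max of 0 and the run sums,
-- replacing A's single running-accumulator loop (alternative decomposition, same cost).


-- ===== PORT A =====
-- A's while loop over i with state (res, max_), as the obvious structural recursion.
def cur_maxLoop (nums : List Int) (res max_ : Int) : Int :=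
  match nums with
  | [] => max max_ res
  | x :: xs =>
      if x = 0 then cur_maxLoop xs 0 (max max_ res)
      else cur_maxLoop xs (res + x) max_

def cur_max (nums : List Int) : Int := cur_maxLoop nums 0 0

-- ===== PORT B =====
-- One step of B's for loop: state (segs, cur).
def segStep (st : List (List Int) × List Int) (x : Int) : List (List Int) × List Int :=
  if x = 0 then (if st.2 = [] then st else (st.1 ++ [st.2], []))
  else (st.1, st.2 ++ [x])

-- B's trailing 'if cur: segs.append(cur)' plus 'max([0] + [sum(seg) ...])'
-- (max of the 0-headed list = fold of max with base 0 over the run sums).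
def segFinish (st : List (List Int) × List Int) : Int :=
  ((if st.2 = [] then st.1 else st.1 ++ [st.2]).map List.sum).foldl max 0

def cur_max_alt (nums : List Int) : Int :=
  segFinish (nums.foldl segStep ([], []))

-- ===== PRECONDITION & SPEC =====
def Spec_cur_max (nums : List Int) (out : Int) : Prop := out = cur_max_alt nums
instance (nums : List Int) (out : Int) : Decidable (Spec_cur_max nums out) := by unfold Spec_cur_max; infer_instance

-- ===== CLAIM (what is proved, stated in full; the proofs are below) =====
def Claim_equal_cur_max : Prop := ∀ (nums : List Int), Dom_cur_max nums → Spec_cur_max nums (cur_max nums)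

-- ===== LEMMAS AND PROOFS =====

theorem le_foldl_max (l : List Int) (m : Int) : m ≤ l.foldl max m := by
  induction l generalizing m with
  | nil => exact le_refl m
  | cons x xs ih => exact le_trans (le_max_left m x) (ih (max m x))

-- hoisting a nonnegative max_ out of A's loop
theorem cur_maxLoop_hoist (xs : List Int) (res m : Int) (hm : 0 ≤ m) :
    cur_maxLoop xs res m = max m (cur_maxLoop xs res 0) := by
  induction xs generalizing res m with
  | nil => simp [cur_maxLoop]; omega
  | cons x xs ih =>
    by_cases hx : x = 0
    · simp [cur_maxLoop, hx]
      rw [ih 0 (max m res) (le_trans hm (le_max_left m res)),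
          ih 0 (max 0 res) (le_max_left 0 res)]
      omega
    · simp [cur_maxLoop, hx]
      exact ih (res + x) m hm

-- main invariant: B's fold-from-any-state finished off equals A's loop plus the max of earlier runs
theorem main_inv (xs : List Int) (segs : List (List Int)) (cur : List Int) :
    segFinish (xs.foldl segStep (segs, cur))
      = max ((segs.map List.sum).foldl max 0) (cur_maxLoop xs cur.sum 0) := by
  induction xs generalizing segs cur with
  | nil =>
    have hms := le_foldl_max (segs.map List.sum) 0
    by_cases hc : cur = []
    · simp [segFinish, cur_maxLoop, hc]
      omega
    · simp [segFinish, cur_maxLoop, hc]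
      omega
  | cons x xs ih =>
    by_cases hx : x = 0
    · by_cases hc : cur = []
      · simp [List.foldl_cons, segStep, hx, hc, cur_maxLoop, ih]
      · simp only [List.foldl_cons, segStep, hx, if_neg hc, cur_maxLoop]
        rw [ih]
        rw [cur_maxLoop_hoist xs 0 (max 0 cur.sum) (le_max_left 0 cur.sum)]
        have hms := le_foldl_max (segs.map List.sum) 0
        simp
        omega
    · simp only [List.foldl_cons, segStep, hx, cur_maxLoop]
      rw [ih]
      simp

-- ===== VERDICT (by name: the statement is the Claim_ definition above) =====
theorem cur_max_spec : Claim_equal_cur_max := by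
  intro nums _
  unfold Spec_cur_max cur_max cur_max_alt
  have h := main_inv nums [] []
  unfold cur_max_alt at *
  rw [h]
  have h0 : cur_maxLoop nums 0 0 = max 0 (cur_maxLoop nums 0 0) :=
    cur_maxLoop_hoist nums 0 0 (le_refl 0)
  simp at h0 ⊢
  omega
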